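-- pv_equiv track=rewrite | github.com/ModPunchtree/URCL-Optimiser-V2 | URCLOptimiserV2/urcl_optimiser_v2.py | removeR0
-- ===== SOURCE A (Python) =====
-- def removeEmptyLines(code: list):
--
--     success = False
--
--     code2 = []
--     for line in code:
--         if line and (line != [""]) and (line != [" "]):
--             code2.append(line)
--         else:
--             success = True
--
--     return code2, success
--
-- def simpleSingleRegisterWriteInstructions():
--     return (
--         "ADD",
--         "RSH",
--         "LOD",
--         "NOR",
--         "SUB",
--         "MOV",
--         "IMM",
--         "LSH",
--         "INC",
--         "DEC",
--         "NEG",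
--         "AND",
--         "OR",
--         "NOT",
--         "XNOR",
--         "XOR",
--         "NAND",
--         "MLT",
--         "DIV",
--         "MOD",
--         "SRS",
--         "BSS",
--         "SETE",
--         "SETNE",
--         "SETG",
--         "SETL",
--         "SETGE",
--         "SETLE",
--         "SETC",
--         "SETNC",
--         "LLOD",
--         "SDIV",
--         "SSETL",
--         "SSETG",
--         "SSETLE",
--         "SSETGE",
--         "ABS"
--     )
--
-- def removeR0(code: list):
--
--     for index, line in enumerate(code):
--         if line[0] in simpleSingleRegisterWriteInstructions():
--             if line[1] == "R0":
--                 code[index] = [""]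
--
--     code, success = removeEmptyLines(code)
--
--     for index, line in enumerate(code):
--         for index2, token in enumerate(line):
--             if token == "R0":
--                 code[index][index2] = "0"
--                 success = True
--
--     return code, success
-- ===== SOURCE B (Python) =====
-- OPS = frozenset((
--     "ADD", "RSH", "LOD", "NOR", "SUB", "MOV", "IMM", "LSH", "INC", "DEC",
--     "NEG", "AND", "OR", "NOT", "XNOR", "XOR", "NAND", "MLT", "DIV", "MOD",
--     "SRS", "BSS", "SETE", "SETNE", "SETG", "SETL", "SETGE", "SETLE", "SETC",
--     "SETNC", "LLOD", "SDIV", "SSETL", "SSETG", "SSETLE", "SSETGE", "ABS"))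
--
--
-- def removeR0(code: list):
--     # Single pass; builds a fresh result list (does not mutate the argument,
--     # unlike the original; equivalence is about the return value only).
--     result = []
--     success = False
--     for line in code:
--         if line and line[0] in OPS and len(line) > 1 and line[1] == "R0":
--             success = True            # write to R0: drop the line
--         elif not line or line == [""] or line == [" "]:
--             success = True            # empty-ish line: drop it
--         else:
--             if "R0" in line:
--                 success = True
--             result.append(["0" if t == "R0" else t for t in line])
--     return result, success
-- ===== Notes on version B (the rewrite author's own statement) =====
-- stated objective: simpler
-- what changed: Replaces A's three phases (mark R0-writes in place, removeEmptyLines, nested rescan replacing R0 tokens) with one pass that decides drop/keep per line and rewrites kept lines immediately; B builds a fresh list and does not mutate the argument (return-value equivalence only).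
import Mathlib
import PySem

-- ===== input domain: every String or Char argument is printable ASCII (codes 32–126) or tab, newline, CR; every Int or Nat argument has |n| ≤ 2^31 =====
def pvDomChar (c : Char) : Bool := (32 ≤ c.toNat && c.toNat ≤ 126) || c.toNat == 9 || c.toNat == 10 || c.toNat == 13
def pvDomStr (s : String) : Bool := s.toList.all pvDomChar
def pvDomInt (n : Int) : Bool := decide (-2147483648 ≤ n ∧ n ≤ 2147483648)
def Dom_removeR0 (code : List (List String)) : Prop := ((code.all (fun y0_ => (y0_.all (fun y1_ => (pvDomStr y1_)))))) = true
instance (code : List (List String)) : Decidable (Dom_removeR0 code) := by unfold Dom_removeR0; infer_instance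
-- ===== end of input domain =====

-- B fuses A's three phases (mark R0-writes, removeEmptyLines, nested R0-token rescan)
-- into one pass building a fresh list; A mutates its argument in place, B does not —
-- the equivalence proved here is about the RETURN value only.

-- ===== PORT A =====
def pvOps : List String :=
  ["ADD", "RSH", "LOD", "NOR", "SUB", "MOV", "IMM", "LSH", "INC", "DEC",
   "NEG", "AND", "OR", "NOT", "XNOR", "XOR", "NAND", "MLT", "DIV", "MOD",
   "SRS", "BSS", "SETE", "SETNE", "SETG", "SETL", "SETGE", "SETLE", "SETC",
   "SETNC", "LLOD", "SDIV", "SSETL", "SSETG", "SSETLE", "SSETGE", "ABS"]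

-- body of A's first loop: code[index] = [""] when line writes R0 (line[0]/line[1] via pyGet?; none = IndexError, excluded by Pre_)
def pvMarkLine (line : List String) : List String :=
  match PySem.List.pyGet? line 0 with
  | some t0 =>
      if pvOps.contains t0 then
        match PySem.List.pyGet? line 1 with
        | some t1 => if t1 = "R0" then [""] else line
        | none => line
      else line
  | none => line

def removeEmptyLines (code : List (List String)) : List (List String) × Bool :=
  code.foldl
    (fun (st : List (List String) × Bool) line =>
      if line ≠ [] ∧ line ≠ [""] ∧ line ≠ [" "] then (st.1 ++ [line], st.2)
      else (st.1, true))
    ([], false)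

def removeR0 (code : List (List String)) : List (List String) × Bool :=
  let code1 := code.map pvMarkLine
  let r := removeEmptyLines code1
  r.1.foldl
    (fun (st : List (List String) × Bool) line =>
      let p := line.foldl
        (fun (p : List String × Bool) token =>
          if token = "R0" then (p.1 ++ ["0"], true) else (p.1 ++ [token], p.2))
        ([], st.2)
      (st.1 ++ [p.1], p.2))
    ([], r.2)

-- ===== PORT B =====
def pvOpsSet : PySem.Set String :=
  PySem.Set.ofList
    ["ADD", "RSH", "LOD", "NOR", "SUB", "MOV", "IMM", "LSH", "INC", "DEC",
     "NEG", "AND", "OR", "NOT", "XNOR", "XOR", "NAND", "MLT", "DIV", "MOD",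
     "SRS", "BSS", "SETE", "SETNE", "SETG", "SETL", "SETGE", "SETLE", "SETC",
     "SETNC", "LLOD", "SDIV", "SSETL", "SSETG", "SSETLE", "SSETGE", "ABS"]

def removeR0_alt (code : List (List String)) : List (List String) × Bool :=
  code.foldl
    (fun (st : List (List String) × Bool) line =>
      if line ≠ [] ∧ pvOpsSet.contains (line.headD "") = true
          ∧ 1 < line.length ∧ line.getD 1 "" = "R0" then
        (st.1, true)
      else if line = [] ∨ line = [""] ∨ line = [" "] then
        (st.1, true)
      else
        (st.1 ++ [line.map (fun t => if t = "R0" then "0" else t)],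
         st.2 || line.contains "R0"))
    ([], false)

-- ===== PRECONDITION & SPEC =====
-- Pre_ excludes exactly the inputs where A raises IndexError: a line that is empty
-- (line[0]) or whose first token is a single-register-write opcode but has no second token (line[1]).
def Pre_removeR0 (code : List (List String)) : Prop :=
  ∀ line ∈ code, line ≠ [] ∧ (pvOps.contains (line.headD "") = true → 2 ≤ line.length)
instance (code : List (List String)) : Decidable (Pre_removeR0 code) := by
  unfold Pre_removeR0; infer_instance

def pvWitness_removeR0 : List (List String) :=
  [["ADD", "R0", "R1", "R2"], ["MOV", "R1", "R0"], [""], ["R0"], [".lbl"]]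

def Spec_removeR0 (code : List (List String)) (out : List (List String) × Bool) : Prop := out = removeR0_alt code
instance (code : List (List String)) (out : List (List String) × Bool) : Decidable (Spec_removeR0 code out) := by unfold Spec_removeR0; infer_instance

-- ===== CLAIM (what is proved, stated in full; the proofs are below) =====
def Claim_equal_removeR0 : Prop := ∀ (code : List (List String)), Dom_removeR0 code → Pre_removeR0 code → Spec_removeR0 code (removeR0 code)


-- ===== LEMMAS AND PROOFS =====

theorem pvOpsSet_eq : pvOpsSet = pvOps := by decide

def pvRepl (t : String) : String := if t = "R0" then "0" else t
def pvKeep (l : List String) : Bool := decide (l ≠ [] ∧ l ≠ [""] ∧ l ≠ [" "])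

theorem removeEmptyLines_fold (code : List (List String)) (acc : List (List String)) (s : Bool) :
    code.foldl
      (fun (st : List (List String) × Bool) line =>
        if line ≠ [] ∧ line ≠ [""] ∧ line ≠ [" "] then (st.1 ++ [line], st.2)
        else (st.1, true))
      (acc, s)
    = (acc ++ code.filter pvKeep, s || code.any (fun l => !pvKeep l)) := by
  induction code generalizing acc s with
  | nil => simp
  | cons l rest ih =>
      simp only [List.foldl, List.filter, List.any, pvKeep]
      split_ifs with h
      · simp [pvKeep, h, ih, List.append_assoc]
      · simp [pvKeep, h, ih]

theorem token_fold (l : List String) (acc : List String) (s : Bool) :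
    l.foldl
      (fun (p : List String × Bool) token =>
        if token = "R0" then (p.1 ++ ["0"], true) else (p.1 ++ [token], p.2))
      (acc, s)
    = (acc ++ l.map pvRepl, s || l.contains "R0") := by
  induction l generalizing acc s with
  | nil => simp
  | cons t rest ih =>
      simp only [List.foldl, List.map, pvRepl]
      by_cases h : t = "R0"
      · subst h; simp [ih, List.append_assoc]
      · simp [h, ih, List.append_assoc, Ne.symm h]

theorem phase3_fold (ls : List (List String)) (acc : List (List String)) (s : Bool) :
    ls.foldl
      (fun (st : List (List String) × Bool) line =>
        let p := line.foldl
          (fun (p : List String × Bool) token =>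
            if token = "R0" then (p.1 ++ ["0"], true) else (p.1 ++ [token], p.2))
          ([], st.2)
        (st.1 ++ [p.1], p.2))
      (acc, s)
    = (acc ++ ls.map (fun l => l.map pvRepl), s || ls.any (fun l => l.contains "R0")) := by
  induction ls generalizing acc s with
  | nil => simp
  | cons l rest ih =>
      simp only [List.foldl, List.map, List.any]
      rw [token_fold]
      simp [ih, List.append_assoc, Bool.or_assoc]

theorem removeR0_closed (code : List (List String)) :
    removeR0 code =
      (((code.map pvMarkLine).filter pvKeep).map (fun l => l.map pvRepl),
       (code.map pvMarkLine).any (fun l => !pvKeep l)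
         || ((code.map pvMarkLine).filter pvKeep).any (fun l => l.contains "R0")) := by
  simp only [removeR0, removeEmptyLines]
  rw [removeEmptyLines_fold]
  simp only [List.nil_append, Bool.false_or]
  rw [phase3_fold]
  simp

theorem alt_fold (code : List (List String)) (acc : List (List String)) (s : Bool)
    (hpre : Pre_removeR0 code) :
    code.foldl
      (fun (st : List (List String) × Bool) line =>
        if line ≠ [] ∧ pvOpsSet.contains (line.headD "") = true
            ∧ 1 < line.length ∧ line.getD 1 "" = "R0" then
          (st.1, true)
        else if line = [] ∨ line = [""] ∨ line = [" "] then
          (st.1, true)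
        else
          (st.1 ++ [line.map (fun t => if t = "R0" then "0" else t)],
           st.2 || line.contains "R0"))
      (acc, s)
    = (acc ++ ((code.map pvMarkLine).filter pvKeep).map (fun l => l.map pvRepl),
       s || ((code.map pvMarkLine).any (fun l => !pvKeep l)
         || ((code.map pvMarkLine).filter pvKeep).any (fun l => l.contains "R0"))) := by
  induction code generalizing acc s with
  | nil => simp
  | cons l rest ih =>
      obtain ⟨hne, hlen⟩ := hpre l (by simp)
      have hrest : Pre_removeR0 rest := fun x hx => hpre x (by simp [hx])
      simp only [List.foldl, List.map, List.filter, List.any]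
      match l, hne with
      | [a], _ =>
          have hca : pvOps.contains a = false := by
            by_cases h : pvOps.contains a = true
            · exact absurd (hlen (by simpa using h)) (by simp)
            · simpa using h
          have hmark : pvMarkLine [a] = [a] := by
            simp [pvMarkLine, pysem]
          have hwf : ¬([a] ≠ [] ∧ pvOpsSet.contains (([a] : List String).headD "") = true
              ∧ 1 < ([a] : List String).length ∧ ([a] : List String).getD 1 "" = "R0") := by
            simp
          rw [if_neg hwf]
          by_cases hdrop : a = "" ∨ a = " "
          · rw [if_pos (by rcases hdrop with h | h <;> simp [h])]
            rw [ih acc true hrest]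
            have hk : pvKeep [a] = false := by
              rcases hdrop with h | h <;> simp [pvKeep, h]
            simp [hmark, hk]
          · rw [not_or] at hdrop
            rw [if_neg (by simp [hdrop.1, hdrop.2])]
            have hk : pvKeep [a] = true := by simp [pvKeep, hdrop.1, hdrop.2]
            rw [ih]
            · have hmap : ([a].map (fun t => if t = "R0" then "0" else t)) = [a].map pvRepl := rfl
              simp [hmark, hk, hmap, Bool.or_assoc, Bool.or_left_comm]
            · exact hrest
      | a :: b :: t, _ =>
          have hk : pvKeep (a :: b :: t) = true := by simp [pvKeep]
          by_cases hca : pvOps.contains a = true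
          · have hmem : a ∈ pvOps := by simpa using hca
            by_cases hb : b = "R0"
            · -- dropped R0-write line
              have hmark : pvMarkLine (a :: b :: t) = [""] := by
                simp [pvMarkLine, pysem, hmem, hb]
              have hsc : pvOpsSet.contains ((a :: b :: t).headD "") = true := by
                rw [pvOpsSet_eq]; simp [PySem.Set.contains, hmem]
              rw [if_pos ⟨by simp, hsc, by simp, by simp [List.getD, hb]⟩]
              rw [ih acc true hrest]
              simp [hmark, pvKeep]
            · have hmark : pvMarkLine (a :: b :: t) = a :: b :: t := by
                simp [pvMarkLine, pysem, hmem, hb]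
              rw [if_neg (fun hcon => hb (by simpa [List.getD] using hcon.2.2.2))]
              rw [if_neg (by simp)]
              rw [ih]
              · have hmap : ((a :: b :: t).map (fun x => if x = "R0" then "0" else x))
                    = (a :: b :: t).map pvRepl := rfl
                simp [hmark, hk, hmap, Bool.or_assoc, Bool.or_left_comm]
              · exact hrest
          · have hmem' : a ∉ pvOps := by simpa using hca
            have hca' : pvOps.contains a = false := by simpa using hca
            have hmark : pvMarkLine (a :: b :: t) = a :: b :: t := by
              unfold pvMarkLine
              rw [show PySem.List.pyGet? (a :: b :: t) 0 = some a by simp [pysem]]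
              simp [hmem']
            rw [if_neg (fun hcon => hmem' (by
                  have h2 := hcon.2.1
                  rw [pvOpsSet_eq] at h2
                  simpa [PySem.Set.contains] using h2))]
            rw [if_neg (by simp)]
            rw [ih]
            · have hmap : ((a :: b :: t).map (fun x => if x = "R0" then "0" else x))
                  = (a :: b :: t).map pvRepl := rfl
              simp [hmark, hk, hmap, Bool.or_assoc, Bool.or_left_comm]
            · exact hrest

-- ===== VERDICT (by name: the statement is the Claim_ definition above) =====
theorem removeR0_spec : Claim_equal_removeR0 := by
  intro code _ hpre
  unfold Spec_removeR0 removeR0_alt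
  rw [removeR0_closed, alt_fold code [] false hpre]
  simp
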